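-- pv_equiv track=rewrite | github.com/13998151318/PNAL | PNALoverall/preprocess_datasets/preprocess_entity_pairs.py | un_abbreviate
-- ===== SOURCE A (Python) =====
-- abbreviate_dict = {"http://dbpedia.org/resource/":"dbp_en:","http://dbpedia.org/property/":"dbp_en_prop:","http://zh.dbpedia.org/resource/":"dbp_zh:","http://zh.dbpedia.org/property/":"dbp_zh_prop:"
--                    ,"http://fr.dbpedia.org/resource/":"dbp_fr:","http://fr.dbpedia.org/property/":"dbp_fr_prop:"
--                    ,"http://ja.dbpedia.org/resource/":"dbp_ja:","http://ja.dbpedia.org/property/":"dbp_ja_prop:"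
--                    ,"http://www.w3.org/2001/XMLSchema#":"xsd:","http://dbpedia.org/datatype/":"dbp_type:"
--                    ,"http://xmlns.com/foaf/0.1/":"foaf:"
--                    ,"http://purl.org/dc/elements/1.1/":"purl:"}
--
-- def un_abbreviate(str1, r=0, attribute=0):
--     rdict = dict(zip(abbreviate_dict.values(), abbreviate_dict.keys()))
--     for short in rdict.keys():
--         if str1.startswith(short):
--             str1 = rdict[short] + str1[len(short):]
--             break
--     if r:
--         if attribute and not str1.startswith("attr_"):
--             str1 = "attr_" + str1
--         elif not attribute and not str1.startswith("rel_"):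
--             str1 = "rel_" + str1
--     return str1
-- ===== SOURCE B (Python) =====
-- abbreviate_dict = {"http://dbpedia.org/resource/":"dbp_en:","http://dbpedia.org/property/":"dbp_en_prop:","http://zh.dbpedia.org/resource/":"dbp_zh:","http://zh.dbpedia.org/property/":"dbp_zh_prop:"
--                    ,"http://fr.dbpedia.org/resource/":"dbp_fr:","http://fr.dbpedia.org/property/":"dbp_fr_prop:"
--                    ,"http://ja.dbpedia.org/resource/":"dbp_ja:","http://ja.dbpedia.org/property/":"dbp_ja_prop:"
--                    ,"http://www.w3.org/2001/XMLSchema#":"xsd:","http://dbpedia.org/datatype/":"dbp_type:"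
--                    ,"http://xmlns.com/foaf/0.1/":"foaf:"
--                    ,"http://purl.org/dc/elements/1.1/":"purl:"}
--
-- _uri_by_abbrev = {short: full for full, short in abbreviate_dict.items()}
--
-- def un_abbreviate(str1, r=0, attribute=0):
--     # every abbreviation ends at its first ':', so parse the prefix once and look it up
--     i = str1.find(':')
--     if i != -1:
--         full = _uri_by_abbrev.get(str1[:i + 1])
--         if full is not None:
--             str1 = full + str1[i + 1:]
--     if r:
--         if attribute and not str1.startswith("attr_"):
--             str1 = "attr_" + str1
--         elif not attribute and not str1.startswith("rel_"):
--             str1 = "rel_" + str1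
--     return str1
-- ===== Notes on version B (the rewrite author's own statement) =====
-- stated objective: idiomatic
-- what changed: Replaces the 12-iteration startswith scan over the reverse dict's keys by parsing the prefix up to the first ':' once (str.find) and doing a single direct dict lookup of that key.
import Mathlib
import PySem

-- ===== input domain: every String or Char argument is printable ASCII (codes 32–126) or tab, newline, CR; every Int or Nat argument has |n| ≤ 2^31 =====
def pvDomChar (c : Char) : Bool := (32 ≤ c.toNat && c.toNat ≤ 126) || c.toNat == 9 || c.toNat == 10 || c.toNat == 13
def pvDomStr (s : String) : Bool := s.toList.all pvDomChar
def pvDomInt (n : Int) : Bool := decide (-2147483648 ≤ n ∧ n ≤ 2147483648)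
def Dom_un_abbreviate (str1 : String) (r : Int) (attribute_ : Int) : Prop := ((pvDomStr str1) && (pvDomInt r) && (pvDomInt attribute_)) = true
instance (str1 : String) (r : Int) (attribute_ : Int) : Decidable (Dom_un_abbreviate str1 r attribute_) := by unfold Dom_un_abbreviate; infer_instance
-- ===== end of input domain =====

-- B replaces A's startswith scan over all abbreviations by parsing the prefix up to the
-- first ':' once and doing a single direct dict lookup (more idiomatic, same results).

-- the module-level abbreviate_dict, as (full URI, abbreviation) pairs in insertion order
def pvAbbrevPairs : List (List Char × List Char) :=
  [ ("http://dbpedia.org/resource/".toList, "dbp_en:".toList)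
  , ("http://dbpedia.org/property/".toList, "dbp_en_prop:".toList)
  , ("http://zh.dbpedia.org/resource/".toList, "dbp_zh:".toList)
  , ("http://zh.dbpedia.org/property/".toList, "dbp_zh_prop:".toList)
  , ("http://fr.dbpedia.org/resource/".toList, "dbp_fr:".toList)
  , ("http://fr.dbpedia.org/property/".toList, "dbp_fr_prop:".toList)
  , ("http://ja.dbpedia.org/resource/".toList, "dbp_ja:".toList)
  , ("http://ja.dbpedia.org/property/".toList, "dbp_ja_prop:".toList)
  , ("http://www.w3.org/2001/XMLSchema#".toList, "xsd:".toList)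
  , ("http://dbpedia.org/datatype/".toList, "dbp_type:".toList)
  , ("http://xmlns.com/foaf/0.1/".toList, "foaf:".toList)
  , ("http://purl.org/dc/elements/1.1/".toList, "purl:".toList) ]

-- ===== PORT A =====
-- rdict = dict(zip(abbreviate_dict.values(), abbreviate_dict.keys()))
def pvARdict : PySem.Dict (List Char) (List Char) :=
  PySem.Dict.ofList (List.zip (pvAbbrevPairs.map (·.2)) (pvAbbrevPairs.map (·.1)))

-- "for short in rdict.keys(): if str1.startswith(short): str1 = rdict[short] + str1[len(short):]; break"
def pvALoop (rdict : PySem.Dict (List Char) (List Char)) : List (List Char) → List Char → List Char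
  | [], cs => cs
  | short :: rest, cs =>
      if PySem.Chars.startswith cs short = true then
        rdict.getD short [] ++ PySem.List.slice cs (some (short.length : Int)) none
      else pvALoop rdict rest cs

-- the trailing r/attribute tagging block of A
def pvTagA (cs : List Char) (r : Int) (attribute_ : Int) : List Char :=
  if r ≠ 0 then
    if attribute_ ≠ 0 ∧ PySem.Chars.startswith cs "attr_".toList = false then "attr_".toList ++ cs
    else if attribute_ = 0 ∧ PySem.Chars.startswith cs "rel_".toList = false then "rel_".toList ++ cs
    else cs
  else cs

def un_abbreviate (str1 : String) (r : Int) (attribute_ : Int) : String :=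
  String.ofList (pvTagA (pvALoop pvARdict pvARdict.keys str1.toList) r attribute_)

-- ===== PORT B =====
-- _uri_by_abbrev = {short: full for full, short in abbreviate_dict.items()}
def pvBRdict : PySem.Dict (List Char) (List Char) :=
  PySem.Dict.ofList (pvAbbrevPairs.map (fun kv => (kv.2, kv.1)))

-- i = str1.find(':'); if i != -1: full = _uri_by_abbrev.get(str1[:i+1]); if full is not None: …
def pvBCore (cs : List Char) : List Char :=
  let i := PySem.Chars.find cs ":".toList
  if i ≠ -1 then
    match pvBRdict.get? (PySem.List.slice cs none (some (i + 1))) with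
    | some full => full ++ PySem.List.slice cs (some (i + 1)) none
    | none => cs
  else cs

-- the trailing r/attribute tagging block of B (textually identical in Source B)
def pvTagB (cs : List Char) (r : Int) (attribute_ : Int) : List Char :=
  if r ≠ 0 then
    if attribute_ ≠ 0 ∧ PySem.Chars.startswith cs "attr_".toList = false then "attr_".toList ++ cs
    else if attribute_ = 0 ∧ PySem.Chars.startswith cs "rel_".toList = false then "rel_".toList ++ cs
    else cs
  else cs

def un_abbreviate_alt (str1 : String) (r : Int) (attribute_ : Int) : String :=
  String.ofList (pvTagB (pvBCore str1.toList) r attribute_)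

-- ===== PRECONDITION & SPEC =====
def Spec_un_abbreviate (str1 : String) (r : Int) (attribute_ : Int) (out : String) : Prop := out = un_abbreviate_alt str1 r attribute_
instance (str1 : String) (r : Int) (attribute_ : Int) (out : String) : Decidable (Spec_un_abbreviate str1 r attribute_ out) := by unfold Spec_un_abbreviate; infer_instance

-- ===== CLAIM (what is proved, stated in full; the proofs are below) =====
def Claim_equal_un_abbreviate : Prop := ∀ (str1 : String) (r : Int) (attribute_ : Int), Dom_un_abbreviate str1 r attribute_ → Spec_un_abbreviate str1 r attribute_ (un_abbreviate str1 r attribute_)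

-- ===== LEMMAS AND PROOFS =====

-- a single char is an infix iff it is a member
lemma pv_singleton_infix {c : Char} {cs : List Char} (h : c ∈ cs) : [c] <:+: cs := by
  obtain ⟨l1, l2, rfl⟩ := List.append_of_mem h
  exact ⟨l1, l2, by simp⟩

-- the first ':' of p ++ ':' :: rest is at index p.length when ':' ∉ p
lemma pv_find_colon (p rest : List Char) (hp : (':' : Char) ∉ p) :
    PySem.Chars.find (p ++ ':' :: rest) [':'] = (p.length : Int) := by
  have hmem : (':' : Char) ∈ p ++ ':' :: rest := by simp
  have hnn : 0 ≤ PySem.Chars.find (p ++ ':' :: rest) [':'] :=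
    (PySem.Chars.find_nonneg_iff _ _).mpr (pv_singleton_infix hmem)
  obtain ⟨hpref, hmin⟩ := PySem.Chars.find_spec hnn
  have hle : (PySem.Chars.find (p ++ ':' :: rest) [':']).toNat ≤ p.length := by
    by_contra hlt
    exact hmin p.length (by omega) ⟨rest, by simp⟩
  have hge : p.length ≤ (PySem.Chars.find (p ++ ':' :: rest) [':']).toNat := by
    by_contra hlt
    have hfl : (PySem.Chars.find (p ++ ':' :: rest) [':']).toNat < p.length := by omega
    obtain ⟨t, ht⟩ := hpref
    have h9 : (p ++ ':' :: rest)[(PySem.Chars.find (p ++ ':' :: rest) [':']).toNat]? = some ':' := by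
      rw [← List.head?_drop, ← ht]; rfl
    rw [List.getElem?_append_left hfl] at h9
    exact hp (List.mem_of_getElem? h9)
  omega

-- for an abbreviation s = prefix ++ [':'] with no earlier colon, matching it as a prefix
-- is the same as the colon-parsed key being exactly s
lemma pv_sw_key (cs s : List Char) (hs : s.dropLast ++ [':'] = s) (hp : (':' : Char) ∉ s.dropLast) :
    PySem.Chars.startswith cs s
      = decide (List.take ((PySem.Chars.find cs [':']).toNat + 1) cs = s) := by
  have hiff : s <+: cs ↔ List.take ((PySem.Chars.find cs [':']).toNat + 1) cs = s := by
    constructor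
    · rintro ⟨rest, rfl⟩
      have hsplit : s ++ rest = s.dropLast ++ ':' :: rest := by rw [← hs]; simp
      rw [hsplit, pv_find_colon s.dropLast rest hp, Int.toNat_natCast,
        List.take_append]
      simp
      rw [List.take_of_length_le (by simp)]
      exact hs
    · intro h; rw [← h]; exact List.take_prefix _ _
  by_cases h : List.take ((PySem.Chars.find cs [':']).toNat + 1) cs = s
  · have h1 := (PySem.Chars.startswith_iff cs s).mpr (hiff.mpr h)
    rw [h1, h]; simp
  · have h2 : PySem.Chars.startswith cs s = false := by
      cases hb : PySem.Chars.startswith cs s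
      · rfl
      · exact absurd (hiff.mp ((PySem.Chars.startswith_iff cs s).mp hb)) h
    rw [h2]; simp [h]

-- when cs has no colon at all, nothing containing ':' is a prefix of it
lemma pv_sw_false (cs s : List Char) (hcol : (':' : Char) ∈ s)
    (hf : PySem.Chars.find cs [':'] = -1) : PySem.Chars.startswith cs s = false := by
  have hni : ¬ ([':'] <:+: cs) := (PySem.Chars.find_eq_neg_one_iff cs [':']).mp hf
  cases hb : PySem.Chars.startswith cs s
  · rfl
  · exact absurd (pv_singleton_infix (((PySem.Chars.startswith_iff cs s).mp hb).subset hcol)) hni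

-- A's first-match loop equals a single lookup of the parsed key
lemma pv_loop_eq (rdict : PySem.Dict (List Char) (List Char)) (ks : List (List Char))
    (cs key sfx : List Char)
    (hsw : ∀ s ∈ ks, PySem.Chars.startswith cs s = decide (key = s))
    (hdrop : ∀ s ∈ ks, key = s → PySem.List.slice cs (some (s.length : Int)) none = sfx) :
    pvALoop rdict ks cs = if key ∈ ks then rdict.getD key [] ++ sfx else cs := by
  induction ks with
  | nil => simp [pvALoop]
  | cons s rest ih =>
    simp only [pvALoop]
    rw [hsw s (List.mem_cons_self)]
    by_cases hk : key = s
    · subst hk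
      rw [hdrop key (List.mem_cons_self) rfl]
      simp
    · have h1 := ih (fun t ht => hsw t (List.mem_cons_of_mem s ht))
        (fun t ht => hdrop t (List.mem_cons_of_mem s ht))
      simp [hk, h1, List.mem_cons]

lemma pv_core (cs : List Char) : pvALoop pvARdict pvARdict.keys cs = pvBCore cs := by
  have hkeysA : pvARdict.keys = pvAbbrevPairs.map (·.2) := by decide
  have hkeysB : pvBRdict.keys = pvAbbrevPairs.map (·.2) := by decide
  have hAB : pvARdict = pvBRdict := by decide
  unfold pvBCore
  simp only [show (":".toList) = [':'] from rfl]
  by_cases hf : PySem.Chars.find cs [':'] = -1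
  · rw [hkeysA, pv_loop_eq pvARdict _ cs [] []
      (by
        intro s hs
        have hcol : (':' : Char) ∈ s := by fin_cases hs <;> decide
        rw [pv_sw_false cs s hcol hf]
        have hne : s ≠ [] := by rintro rfl; simp at hcol
        simp [Ne.symm hne])
      (by intro s hs h; fin_cases hs <;> exact absurd h (by decide))]
    rw [if_neg (by decide)]
    simp [hf]
  · have hnn : 0 ≤ PySem.Chars.find cs [':'] := by
      have := PySem.Chars.neg_one_le_find (s := cs) (sub := [':'])
      omega
    obtain ⟨hpref, hmin⟩ := PySem.Chars.find_spec hnn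
    have hlen : (PySem.Chars.find cs [':']).toNat + 1 ≤ cs.length := by
      obtain ⟨t, ht⟩ := hpref
      have h1 := congrArg List.length ht
      simp [List.length_drop] at h1
      omega
    have hkey_slice : PySem.List.slice cs none (some (PySem.Chars.find cs [':'] + 1))
        = List.take ((PySem.Chars.find cs [':']).toNat + 1) cs := by
      rw [PySem.List.slice_to cs (b := PySem.Chars.find cs [':'] + 1) (by omega)]
      congr 1; omega
    have hsfx : PySem.List.slice cs (some (PySem.Chars.find cs [':'] + 1)) none
        = List.drop ((PySem.Chars.find cs [':']).toNat + 1) cs := by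
      rw [PySem.List.slice_from cs (a := PySem.Chars.find cs [':'] + 1) (by omega)]
      congr 1; omega
    rw [hkeysA, pv_loop_eq pvARdict _ cs (List.take ((PySem.Chars.find cs [':']).toNat + 1) cs)
      (List.drop ((PySem.Chars.find cs [':']).toNat + 1) cs)
      (by intro s hs; fin_cases hs <;> exact pv_sw_key cs _ (by decide) (by decide))
      (by
        intro s hs h
        rw [← h]
        have hklen : ((List.take ((PySem.Chars.find cs [':']).toNat + 1) cs).length : Int)
            = ((PySem.Chars.find cs [':']).toNat + 1 : Nat) := by
          simp [List.length_take]; omega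
        rw [hklen, PySem.List.slice_from_natCast])]
    rw [if_pos hf, hkey_slice, hsfx]
    by_cases hk : List.take ((PySem.Chars.find cs [':']).toNat + 1) cs ∈ pvAbbrevPairs.map (·.2)
    · rw [if_pos hk]
      have hcont : pvBRdict.contains (List.take ((PySem.Chars.find cs [':']).toNat + 1) cs) = true :=
        (PySem.Dict.contains_iff_mem_keys pvBRdict _).mpr (hkeysB ▸ hk)
      have hsome : (pvBRdict.get? (List.take ((PySem.Chars.find cs [':']).toNat + 1) cs)).isSome := by
        rw [← PySem.Dict.contains_eq_isSome_get?]; exact hcont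
      obtain ⟨v, hv⟩ := Option.isSome_iff_exists.mp hsome
      rw [hv, hAB, PySem.Dict.getD_of_get?_eq_some pvBRdict [] hv]
    · rw [if_neg hk]
      have hnone : pvBRdict.get? (List.take ((PySem.Chars.find cs [':']).toNat + 1) cs) = none := by
        rw [PySem.Dict.get?_eq_none_iff_not_mem_keys, hkeysB]
        exact hk
      rw [hnone]

-- ===== VERDICT (by name: the statement is the Claim_ definition above) =====
theorem un_abbreviate_spec : Claim_equal_un_abbreviate := by
  intro str1 r attribute_ _
  unfold Spec_un_abbreviate un_abbreviate un_abbreviate_alt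
  rw [pv_core]
  rfl
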